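-- pv_equiv track=rewrite | github.com/jpcardozx/arco-find | legacy/arco_s_tier_merged.py | detect_business_focus
-- ===== SOURCE A (Python) =====
-- def detect_business_focus(text: str) -> str:
--     """Detecta foco do negócio apenas baseado em conteúdo real dos anúncios"""
--     if not text.strip():
--         return "unknown"
--
--     text_lower = text.lower()
--     fitness_types = ['pilates', 'yoga', 'crossfit', 'boxing', 'martial arts', 'cycling', 'barre']
--
--     for fitness_type in fitness_types:
--         if fitness_type in text_lower:
--             return fitness_type
--
--     if any(term in text_lower for term in ['personal trainer', 'pt ', 'personal training']):
--         return "personal_training"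
--     if any(term in text_lower for term in ['gym', 'fitness', 'workout']):
--         return "general_fitness"
--
--     return "unknown"
-- ===== SOURCE B (Python) =====
-- RULES = [
--     ('pilates', 'pilates'), ('yoga', 'yoga'), ('crossfit', 'crossfit'),
--     ('boxing', 'boxing'), ('martial arts', 'martial arts'),
--     ('cycling', 'cycling'), ('barre', 'barre'),
--     ('personal trainer', 'personal_training'), ('pt ', 'personal_training'),
--     ('personal training', 'personal_training'),
--     ('gym', 'general_fitness'), ('fitness', 'general_fitness'),
--     ('workout', 'general_fitness'),
-- ]
--
--
-- def detect_business_focus(text: str) -> str: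
--     if not text.strip():
--         return "unknown"
--     low = text.lower()
--     best = len(RULES)  # priority accumulator: index of best rule seen so far
--     for i in range(len(low) + 1):
--         suf = low[i:]
--         j = 0
--         for pat, _label in RULES:
--             if j < best and suf.startswith(pat):
--                 best = j
--             j += 1
--     return RULES[best][1] if best < len(RULES) else "unknown"
-- ===== Notes on version B (the rewrite author's own statement) =====
-- stated objective: alternative
-- what changed: A runs one Python substring-membership search per keyword with early returns; B instead makes a single left-to-right scan over the text positions, keeping a minimum-rule-index accumulator for the patterns that start at each position, and returns the label of the best rule at the end (B trades speed for a uniform one-pass formulation; its constant factor is larger).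
import Mathlib
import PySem

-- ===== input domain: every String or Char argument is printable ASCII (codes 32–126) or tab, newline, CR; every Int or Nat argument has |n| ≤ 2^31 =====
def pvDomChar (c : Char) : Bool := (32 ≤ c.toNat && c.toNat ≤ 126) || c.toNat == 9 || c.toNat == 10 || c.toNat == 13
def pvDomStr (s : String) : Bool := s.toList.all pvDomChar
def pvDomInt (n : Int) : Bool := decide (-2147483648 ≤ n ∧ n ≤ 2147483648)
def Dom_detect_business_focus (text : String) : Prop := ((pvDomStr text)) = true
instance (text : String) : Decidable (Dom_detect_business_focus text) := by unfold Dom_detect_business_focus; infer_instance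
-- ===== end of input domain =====

-- B replaces A's sequential per-keyword substring searches (with early returns) by a single
-- scan over text positions keeping a minimum-priority rule accumulator; objective: alternative.

-- ===== PORT A =====
def detect_business_focus (text : String) : String :=
  if PySem.Str.strip text = "" then "unknown"
  else
    let text_lower := PySem.Str.lower text
    let fitness_types := ["pilates", "yoga", "crossfit", "boxing", "martial arts", "cycling", "barre"]
    match fitness_types.find? (fun t => PySem.Str.isIn t text_lower) with
    | some t => t
    | none =>
      if ["personal trainer", "pt ", "personal training"].any
          (fun t => PySem.Str.isIn t text_lower) then "personal_training"
      else if ["gym", "fitness", "workout"].any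
          (fun t => PySem.Str.isIn t text_lower) then "general_fitness"
      else "unknown"

-- ===== PORT B =====
def pvRules : List (String × String) :=
  [("pilates", "pilates"), ("yoga", "yoga"), ("crossfit", "crossfit"),
   ("boxing", "boxing"), ("martial arts", "martial arts"),
   ("cycling", "cycling"), ("barre", "barre"),
   ("personal trainer", "personal_training"), ("pt ", "personal_training"),
   ("personal training", "personal_training"),
   ("gym", "general_fitness"), ("fitness", "general_fitness"),
   ("workout", "general_fitness")]

-- inner loop of Source B: "for pat, _label in RULES: if j < best and suf.startswith(pat): best = j; j += 1"
def pvInner (suf : List Char) : List (String × String) → Nat → Nat → Nat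
  | [], _, best => best
  | r :: rs, j, best =>
      pvInner suf rs (j + 1)
        (if j < best ∧ PySem.Chars.startswith suf r.1.toList = true then j else best)

def detect_business_focus_alt (text : String) : String :=
  if PySem.Str.strip text = "" then "unknown"
  else
    let low := (PySem.Str.lower text).toList
    let best := (List.range (low.length + 1)).foldl
        (fun b i => pvInner (low.drop i) pvRules 0 b) pvRules.length
    if h : best < pvRules.length then (pvRules[best]).2 else "unknown"

-- ===== PRECONDITION & SPEC =====
def Spec_detect_business_focus (text : String) (out : String) : Prop := out = detect_business_focus_alt text
instance (text : String) (out : String) : Decidable (Spec_detect_business_focus text out) := by unfold Spec_detect_business_focus; infer_instance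

-- ===== CLAIM (what is proved, stated in full; the proofs are below) =====
def Claim_equal_detect_business_focus : Prop := ∀ (text : String), Dom_detect_business_focus text → Spec_detect_business_focus text (detect_business_focus text)

-- ===== LEMMAS AND PROOFS =====

theorem pvInner_spec (suf : List Char) (rs : List (String × String)) :
    ∀ (j best : Nat), pvInner suf rs j best =
      (if rs.findIdx (fun r => PySem.Chars.startswith suf r.1.toList) < rs.length
       then min best (j + rs.findIdx (fun r => PySem.Chars.startswith suf r.1.toList))
       else best) := by
  induction rs with
  | nil => intro j best; simp [pvInner]
  | cons r rs ih =>
    intro j best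
    have hfl := List.findIdx_le_length (p := fun (r : String × String) => PySem.Chars.startswith suf r.1.toList) (xs := rs)
    obtain hr | hr := Bool.eq_false_or_eq_true (PySem.Chars.startswith suf r.1.toList) <;>
      simp only [pvInner, ih, List.findIdx_cons, List.length_cons, hr, cond_true, cond_false,
        and_true, and_false, if_true, if_false, Bool.true_eq_false, Bool.false_eq_true] <;>
      split_ifs <;> omega

theorem pv_findIdx_le_of_getElem {α : Type} (p : α → Bool) (l : List α) (k : Nat)
    (hk : k < l.length) (h : p l[k] = true) : l.findIdx p ≤ k := by
  by_contra hc
  have hf := List.not_of_lt_findIdx (by omega : k < l.findIdx p)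
  exact absurd h (ne_true_of_eq_false hf)


def pvF (low : List Char) (b i : Nat) : Nat := pvInner (low.drop i) pvRules 0 b

def pvG (low : List Char) (i : Nat) : Nat :=
  pvRules.findIdx (fun r => PySem.Chars.startswith (low.drop i) r.1.toList)

theorem pvF_eq (low : List Char) (b i : Nat) :
    pvF low b i = if pvG low i < pvRules.length then min b (pvG low i) else b := by
  unfold pvF pvG
  rw [pvInner_spec]
  simp only [Nat.zero_add]

theorem pvG_le (low : List Char) (i : Nat) : pvG low i ≤ pvRules.length :=
  List.findIdx_le_length

theorem pvF_le (low : List Char) (b i : Nat) : pvF low b i ≤ b := by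
  rw [pvF_eq]; split_ifs <;> omega

theorem pv_fold_le (low : List Char) (idx : List Nat) :
    ∀ b : Nat, idx.foldl (pvF low) b ≤ b := by
  induction idx with
  | nil => intro b; simp
  | cons x xs ih =>
    intro b
    rw [List.foldl_cons]
    exact le_trans (ih _) (pvF_le low b x)

theorem pv_fold_key (low : List Char) (idx : List Nat) :
    ∀ b : Nat, b ≤ pvRules.length →
      ((∀ i ∈ idx, idx.foldl (pvF low) b ≤ pvG low i) ∧
       (idx.foldl (pvF low) b = b ∨ ∃ i ∈ idx, idx.foldl (pvF low) b = pvG low i)) := by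
  induction idx with
  | nil => intro b _; simp
  | cons x xs ih =>
    intro b hb
    obtain ⟨h2, h3⟩ := ih (pvF low b x) (le_trans (pvF_le low b x) hb)
    constructor
    · intro i hi
      rw [List.foldl_cons]
      simp only [List.mem_cons] at hi
      rcases hi with rfl | hi
      · by_cases hgi : pvG low i < pvRules.length
        · have hfb : pvF low b i ≤ pvG low i := by
            rw [pvF_eq, if_pos hgi]; omega
          exact le_trans (pv_fold_le low xs _) hfb
        · have hgiL : pvG low i = pvRules.length := by have := pvG_le low i; omega
          rw [hgiL]
          exact le_trans (pv_fold_le low xs _) (le_trans (pvF_le low b i) hb)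
      · simpa using h2 i hi
    · simp only [List.foldl_cons] at h3 ⊢
      rcases h3 with h3 | ⟨i', hi', h3⟩
      · rw [h3, pvF_eq]
        split_ifs with hgi
        · rcases Nat.le_total b (pvG low x) with h | h
          · left; omega
          · right; exact ⟨x, by simp, by omega⟩
        · left; rfl
      · right; exact ⟨i', by simp [hi'], h3⟩

theorem pv_outer_spec (low : List Char) :
    (List.range (low.length + 1)).foldl
        (fun b i => pvInner (low.drop i) pvRules 0 b) pvRules.length =
      pvRules.findIdx (fun r => PySem.Chars.isIn r.1.toList low) := by
  have hfold : (List.range (low.length + 1)).foldl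
      (fun b i => pvInner (low.drop i) pvRules 0 b) pvRules.length
      = (List.range (low.length + 1)).foldl (pvF low) pvRules.length := rfl
  rw [hfold]
  obtain ⟨h2, h3⟩ := pv_fold_key low (List.range (low.length + 1)) pvRules.length (le_refl _)
  have hmle : pvRules.findIdx (fun r => PySem.Chars.isIn r.1.toList low) ≤ pvRules.length :=
    List.findIdx_le_length
  have hle1 : pvRules.findIdx (fun r => PySem.Chars.isIn r.1.toList low)
      ≤ (List.range (low.length + 1)).foldl (pvF low) pvRules.length := by
    rcases h3 with h3 | ⟨i, hi, h3⟩
    · omega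
    · rw [h3]
      by_cases hgi : pvG low i < pvRules.length
      · have hq : PySem.Chars.startswith (low.drop i) ((pvRules[pvG low i]'(hgi)).1.toList)
            = true := by
          have := List.findIdx_getElem (w := hgi)
          simpa [pvG] using this
        have hpm : (fun r => PySem.Chars.isIn r.1.toList low) (pvRules[pvG low i]'(hgi)) = true := by
          simp only
          rw [← PySem.Chars.exists_prefix_drop_iff_isIn]
          exact ⟨i, (PySem.Chars.startswith_iff _ _).mp hq⟩
        have := pv_findIdx_le_of_getElem (fun r => PySem.Chars.isIn r.1.toList low) pvRules (pvG low i) hgi hpm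
        omega
      · have := pvG_le low i; omega
  have hle2 : (List.range (low.length + 1)).foldl (pvF low) pvRules.length
      ≤ pvRules.findIdx (fun r => PySem.Chars.isIn r.1.toList low) := by
    by_cases hmL : pvRules.findIdx (fun r => PySem.Chars.isIn r.1.toList low) < pvRules.length
    · have hpm : (fun r => PySem.Chars.isIn r.1.toList low)
          (pvRules[pvRules.findIdx (fun r => PySem.Chars.isIn r.1.toList low)]'(hmL)) = true :=
        List.findIdx_getElem (w := hmL)
      have hinf : ∃ j, (pvRules[pvRules.findIdx (fun r => PySem.Chars.isIn r.1.toList low)]'(hmL)).1.toList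
          <+: low.drop j := by
        rw [PySem.Chars.exists_prefix_drop_iff_isIn]
        simpa using hpm
      obtain ⟨j, hj⟩ := hinf
      have hj' : (pvRules[pvRules.findIdx (fun r => PySem.Chars.isIn r.1.toList low)]'(hmL)).1.toList
          <+: low.drop (min j low.length) := by
        by_cases hjl : j ≤ low.length
        · simpa [Nat.min_eq_left hjl] using hj
        · have hd1 : low.drop j = [] := List.drop_eq_nil_of_le (by omega)
          have hd2 : low.drop (min j low.length) = [] := List.drop_eq_nil_of_le (by omega)
          rw [hd2]; rw [hd1] at hj; exact hj
      have hgm : pvG low (min j low.length)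
          ≤ pvRules.findIdx (fun r => PySem.Chars.isIn r.1.toList low) := by
        unfold pvG
        exact pv_findIdx_le_of_getElem _ pvRules _ hmL
          (by simpa using (PySem.Chars.startswith_iff _ _).mpr hj')
      have hmem : min j low.length ∈ List.range (low.length + 1) :=
        List.mem_range.mpr (by omega)
      have := h2 _ hmem
      omega
    · have hF := pv_fold_le low (List.range (low.length + 1)) pvRules.length
      omega
  omega

-- ===== VERDICT (by name: the statement is the Claim_ definition above) =====
theorem detect_business_focus_spec : Claim_equal_detect_business_focus := by
  intro text _
  unfold Spec_detect_business_focus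
  simp only [detect_business_focus, detect_business_focus_alt]
  by_cases hs : PySem.Str.strip text = ""
  · simp [hs]
  · simp only [hs, if_false]
    rw [pv_outer_spec]
    by_cases h1 : PySem.Chars.isIn ['p', 'i', 'l', 'a', 't', 'e', 's'] (PySem.Chars.lower text.toList) = true
    · simp [pvRules, List.findIdx_cons, List.find?, List.any, h1]
    by_cases h2 : PySem.Chars.isIn ['y', 'o', 'g', 'a'] (PySem.Chars.lower text.toList) = true
    · simp [pvRules, List.findIdx_cons, List.find?, List.any, h1, h2]
    by_cases h3 : PySem.Chars.isIn ['c', 'r', 'o', 's', 's', 'f', 'i', 't'] (PySem.Chars.lower text.toList) = true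
    · simp [pvRules, List.findIdx_cons, List.find?, List.any, h1, h2, h3]
    by_cases h4 : PySem.Chars.isIn ['b', 'o', 'x', 'i', 'n', 'g'] (PySem.Chars.lower text.toList) = true
    · simp [pvRules, List.findIdx_cons, List.find?, List.any, h1, h2, h3, h4]
    by_cases h5 : PySem.Chars.isIn ['m', 'a', 'r', 't', 'i', 'a', 'l', ' ', 'a', 'r', 't', 's'] (PySem.Chars.lower text.toList) = true
    · simp [pvRules, List.findIdx_cons, List.find?, List.any, h1, h2, h3, h4, h5]
    by_cases h6 : PySem.Chars.isIn ['c', 'y', 'c', 'l', 'i', 'n', 'g'] (PySem.Chars.lower text.toList) = true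
    · simp [pvRules, List.findIdx_cons, List.find?, List.any, h1, h2, h3, h4, h5, h6]
    by_cases h7 : PySem.Chars.isIn ['b', 'a', 'r', 'r', 'e'] (PySem.Chars.lower text.toList) = true
    · simp [pvRules, List.findIdx_cons, List.find?, List.any, h1, h2, h3, h4, h5, h6, h7]
    by_cases h8 : PySem.Chars.isIn ['p', 'e', 'r', 's', 'o', 'n', 'a', 'l', ' ', 't', 'r', 'a', 'i', 'n', 'e', 'r'] (PySem.Chars.lower text.toList) = true
    · simp [pvRules, List.findIdx_cons, List.find?, List.any, h1, h2, h3, h4, h5, h6, h7, h8]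
    by_cases h9 : PySem.Chars.isIn ['p', 't', ' '] (PySem.Chars.lower text.toList) = true
    · simp [pvRules, List.findIdx_cons, List.find?, List.any, h1, h2, h3, h4, h5, h6, h7, h8, h9]
    by_cases h10 : PySem.Chars.isIn ['p', 'e', 'r', 's', 'o', 'n', 'a', 'l', ' ', 't', 'r', 'a', 'i', 'n', 'i', 'n', 'g'] (PySem.Chars.lower text.toList) = true
    · simp [pvRules, List.findIdx_cons, List.find?, List.any, h1, h2, h3, h4, h5, h6, h7, h8, h9, h10]
    by_cases h11 : PySem.Chars.isIn ['g', 'y', 'm'] (PySem.Chars.lower text.toList) = true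
    · simp [pvRules, List.findIdx_cons, List.find?, List.any, h1, h2, h3, h4, h5, h6, h7, h8, h9, h10, h11]
    by_cases h12 : PySem.Chars.isIn ['f', 'i', 't', 'n', 'e', 's', 's'] (PySem.Chars.lower text.toList) = true
    · simp [pvRules, List.findIdx_cons, List.find?, List.any, h1, h2, h3, h4, h5, h6, h7, h8, h9, h10, h11, h12]
    by_cases h13 : PySem.Chars.isIn ['w', 'o', 'r', 'k', 'o', 'u', 't'] (PySem.Chars.lower text.toList) = true
    · simp [pvRules, List.findIdx_cons, List.find?, List.any, h1, h2, h3, h4, h5, h6, h7, h8, h9, h10, h11, h12, h13]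
    · simp [pvRules, List.findIdx_cons, List.find?, List.any, h1, h2, h3, h4, h5, h6, h7, h8, h9, h10, h11, h12, h13]
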